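-- pv_equiv track=rewrite | github.com/Blight-East/Meridian | runtime/intelligence/contact_discovery.py | _role_aligned
-- ===== SOURCE A (Python) =====
-- def _role_aligned(local_part, role_hint, target_prefixes):
--     clean_local = str(local_part or "").strip().lower()
--     clean_hint = str(role_hint or "").strip().lower()
--     normalized_targets = {str(role or "").strip().lower() for role in target_prefixes or []}
--     if clean_local in normalized_targets or clean_hint in normalized_targets:
--         return True
--     alias_map = {
--         "ops": "operations",
--         "operation": "operations",
--         "support leadership": "support",
--         "payment": "payments",
--     }
--     if alias_map.get(clean_local) in normalized_targets or alias_map.get(clean_hint) in normalized_targets: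
--         return True
--     return False
-- ===== SOURCE B (Python) =====
-- def _role_aligned(local_part, role_hint, target_prefixes):
--     targets = {str(role or "").strip().lower() for role in target_prefixes or []}
--     alias_map = {
--         "ops": "operations",
--         "operation": "operations",
--         "support leadership": "support",
--         "payment": "payments",
--     }
--     accept = set(targets)
--     for key, canonical in alias_map.items():
--         if canonical in targets:
--             accept.add(key)
--     clean_local = str(local_part or "").strip().lower()
--     clean_hint = str(role_hint or "").strip().lower()
--     return clean_local in accept or clean_hint in accept
-- ===== Notes on version B (the rewrite author's own statement) =====
-- stated objective: alternative
-- what changed: B precomputes one acceptance set (targets plus every alias key whose canonical value is a target) and replaces A's four separate membership/alias probes with two flat lookups in that set.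
import Mathlib
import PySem

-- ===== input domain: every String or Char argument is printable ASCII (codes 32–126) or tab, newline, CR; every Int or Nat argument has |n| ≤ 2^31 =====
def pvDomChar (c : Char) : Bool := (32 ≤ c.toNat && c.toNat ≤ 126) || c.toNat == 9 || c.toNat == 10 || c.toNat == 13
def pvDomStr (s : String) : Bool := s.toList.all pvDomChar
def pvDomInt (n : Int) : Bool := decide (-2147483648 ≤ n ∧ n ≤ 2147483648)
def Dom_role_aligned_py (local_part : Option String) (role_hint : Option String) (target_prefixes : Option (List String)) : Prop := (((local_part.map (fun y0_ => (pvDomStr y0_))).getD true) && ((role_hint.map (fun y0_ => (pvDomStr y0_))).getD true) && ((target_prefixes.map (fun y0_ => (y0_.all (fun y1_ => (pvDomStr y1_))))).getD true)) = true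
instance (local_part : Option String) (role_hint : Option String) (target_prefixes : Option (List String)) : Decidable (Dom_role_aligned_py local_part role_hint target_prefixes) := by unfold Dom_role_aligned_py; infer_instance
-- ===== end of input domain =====

-- B builds one acceptance set (targets plus alias keys whose canonical value is a target) and does two flat lookups, instead of A's four separate probes.

-- str(x or "").strip().lower() (both Pythons contain this normalization verbatim)
def pvClean (s : String) : String := PySem.Str.lower (PySem.Str.strip s)

-- ===== PORT A =====
def role_aligned_py (local_part : Option String) (role_hint : Option String) (target_prefixes : Option (List String)) : Bool :=
  let clean_local := pvClean (local_part.getD "")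
  let clean_hint := pvClean (role_hint.getD "")
  let normalized_targets : PySem.Set String := PySem.Set.ofList ((target_prefixes.getD []).map pvClean)
  if PySem.Set.contains normalized_targets clean_local || PySem.Set.contains normalized_targets clean_hint then
    true
  else
    let alias_map : PySem.Dict String String := PySem.Dict.ofList
      [("ops", "operations"), ("operation", "operations"),
       ("support leadership", "support"), ("payment", "payments")]
    -- 'alias_map.get(x) in normalized_targets': None is never in a set of strings
    if (match alias_map.get? clean_local with
        | some v => PySem.Set.contains normalized_targets v
        | none => false) ||
       (match alias_map.get? clean_hint with
        | some v => PySem.Set.contains normalized_targets v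
        | none => false) then
      true
    else
      false

-- ===== PORT B =====
def role_aligned_py_alt (local_part : Option String) (role_hint : Option String) (target_prefixes : Option (List String)) : Bool :=
  let targets : PySem.Set String := PySem.Set.ofList ((target_prefixes.getD []).map pvClean)
  let alias_map : PySem.Dict String String := PySem.Dict.ofList
    [("ops", "operations"), ("operation", "operations"),
     ("support leadership", "support"), ("payment", "payments")]
  let accept : PySem.Set String :=
    alias_map.items.foldl
      (fun acc kv => if PySem.Set.contains targets kv.2 then PySem.Set.add acc kv.1 else acc)
      (PySem.Set.ofList targets)
  let clean_local := pvClean (local_part.getD "")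
  let clean_hint := pvClean (role_hint.getD "")
  PySem.Set.contains accept clean_local || PySem.Set.contains accept clean_hint

-- ===== PRECONDITION & SPEC =====
def Spec_role_aligned_py (local_part : Option String) (role_hint : Option String) (target_prefixes : Option (List String)) (out : Bool) : Prop := out = role_aligned_py_alt local_part role_hint target_prefixes
instance (local_part : Option String) (role_hint : Option String) (target_prefixes : Option (List String)) (out : Bool) : Decidable (Spec_role_aligned_py local_part role_hint target_prefixes out) := by unfold Spec_role_aligned_py; infer_instance

-- ===== CLAIM (what is proved, stated in full; the proofs are below) =====
def Claim_equal_role_aligned_py : Prop := ∀ (local_part : Option String) (role_hint : Option String) (target_prefixes : Option (List String)), Dom_role_aligned_py local_part role_hint target_prefixes → Spec_role_aligned_py local_part role_hint target_prefixes (role_aligned_py local_part role_hint target_prefixes)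

-- ===== LEMMAS AND PROOFS =====

-- membership in B's acceptance set, for an arbitrary (nodup) target set
lemma contains_accept (T : PySem.Set String) (hT : T.Nodup) (x : String) :
    PySem.Set.contains
      (([("ops", "operations"), ("operation", "operations"),
         ("support leadership", "support"), ("payment", "payments")] : List (String × String)).foldl
        (fun acc kv => if PySem.Set.contains T kv.2 then PySem.Set.add acc kv.1 else acc)
        (PySem.Set.ofList T)) x
    = (PySem.Set.contains T x ||
       (match (PySem.Dict.ofList
          [("ops", "operations"), ("operation", "operations"),
           ("support leadership", "support"), ("payment", "payments")] : PySem.Dict String String).get? x with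
        | some v => PySem.Set.contains T v
        | none => false)) := by
  have hd : (PySem.Dict.ofList
      [("ops", "operations"), ("operation", "operations"),
       ("support leadership", "support"), ("payment", "payments")] : PySem.Dict String String)
      = PySem.Dict.mk
      [("ops", "operations"), ("operation", "operations"),
       ("support leadership", "support"), ("payment", "payments")] := by decide
  simp only [List.foldl, PySem.Set.ofList_eq_self_of_nodup T hT, hd]
  rw [Bool.eq_iff_iff]
  split_ifs with h1 h2 h3 h4 <;>
    simp only [PySem.Dict.get?_mk_cons, PySem.Set.contains_iff,
      PySem.Set.mem_add, Bool.or_eq_true] <;>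
    by_cases e1 : ("ops" : String) = x <;> by_cases e2 : ("operation" : String) = x <;>
    by_cases e3 : ("support leadership" : String) = x <;> by_cases e4 : ("payment" : String) = x <;>
    subst_vars <;> simp_all [beq_iff_eq] <;> tauto

-- ===== VERDICT (by name: the statement is the Claim_ definition above) =====
theorem role_aligned_py_spec : Claim_equal_role_aligned_py := by
  intro lp rh tp _
  unfold Spec_role_aligned_py role_aligned_py role_aligned_py_alt
  have hitems : (PySem.Dict.ofList
      [("ops", "operations"), ("operation", "operations"),
       ("support leadership", "support"), ("payment", "payments")] : PySem.Dict String String).items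
      = [("ops", "operations"), ("operation", "operations"),
         ("support leadership", "support"), ("payment", "payments")] := by decide
  simp only [hitems]
  rw [contains_accept _ (PySem.Set.nodup_ofList _), contains_accept _ (PySem.Set.nodup_ofList _)]
  generalize pvClean ((lp).getD "") = a
  generalize pvClean ((rh).getD "") = b
  generalize (PySem.Set.ofList (((tp).getD []).map pvClean)) = T
  by_cases h1 : PySem.Set.contains T a = true <;> by_cases h2 : PySem.Set.contains T b = true <;>
    simp_all
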